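-- pv_equiv track=rewrite | github.com/lucia-ferrer/evolutivos | INVERSE_PERMUTATION/file.py | decode_I
-- ===== SOURCE A (Python) =====
-- def decode_I(inv):
--     N = len(inv)
--     permutation = [0] * N
--
--     for i in range(N):
--         count = inv[i]
--         j = 0
--         while count > 0 or permutation[j] != 0:
--             if permutation[j] == 0:
--                 count -= 1
--             j += 1
--             if j == N:  # Check if j exceeds the bounds of the permutation
--                 break  # Exit the loop to prevent an error
--         if j < N:  # Ensure j is within bounds
--             permutation[j] = i + 1
--
--     return permutation
-- ===== SOURCE B (Python) =====
-- def decode_I(inv):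
--     N = len(inv)
--     permutation = [0] * N
--     free = list(range(N))
--     for i, c in enumerate(inv):
--         k = c if c > 0 else 0
--         if k < len(free):
--             permutation[free.pop(k)] = i + 1
--     return permutation
-- ===== Notes on version B (the rewrite author's own statement) =====
-- stated objective: faster
-- what changed: A scans the whole permutation array from index 0 for each element to find the k-th remaining zero slot; B maintains a list of still-free positions and pops the k-th one directly, eliminating the inner scan.
import Mathlib
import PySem

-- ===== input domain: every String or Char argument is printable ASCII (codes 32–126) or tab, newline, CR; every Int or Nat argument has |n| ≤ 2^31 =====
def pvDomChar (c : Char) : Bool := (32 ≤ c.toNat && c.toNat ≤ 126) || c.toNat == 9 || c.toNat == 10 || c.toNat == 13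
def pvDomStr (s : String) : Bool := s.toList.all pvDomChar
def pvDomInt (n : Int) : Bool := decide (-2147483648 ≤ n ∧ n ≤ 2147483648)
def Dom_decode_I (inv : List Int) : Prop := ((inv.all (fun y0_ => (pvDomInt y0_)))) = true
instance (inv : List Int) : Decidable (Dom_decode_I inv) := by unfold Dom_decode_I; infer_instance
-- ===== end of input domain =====

-- B replaces A's inner linear scan for the k-th empty slot by a list of still-free
-- positions popped by index (objective: faster by a constant factor at Python level).

-- ===== PORT A =====
-- A's inner while loop. `j` advances by 1 each pass and the loop breaks at j = N,
-- so `fuel` (called with N - j = N) bounds the iteration count; permutation[j] is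
-- always read in range, ported as getD (exact).
def decodeInner (perm : List Int) : Int → Nat → Nat → Nat
  | _, j, 0 => j
  | count, j, fuel+1 =>
    if count > 0 ∨ perm.getD j 0 ≠ 0 then
      if j + 1 = perm.length then j + 1
      else decodeInner perm (if perm.getD j 0 = 0 then count - 1 else count) (j+1) fuel
    else j

-- one iteration of A's outer `for i in range(N)` loop
def decodeStep (inv : List Int) (perm : List Int) (i : Int) : List Int :=
  let count := PySem.List.pyGetD inv i 0
  let j := decodeInner perm count 0 inv.length
  if j < inv.length then perm.set j (i + 1) else perm

def decode_I (inv : List Int) : List Int :=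
  (PySem.List.pyRange 0 (inv.length : Int) 1).foldl (decodeStep inv)
    (List.replicate inv.length 0)

-- ===== PORT B =====
-- one iteration of B's loop over enumerate(inv); state = (permutation, free)
def altStep (st : List Int × List Int) (ic : Int × Int) : List Int × List Int :=
  let k : Int := if ic.2 > 0 then ic.2 else 0
  if k < (st.2.length : Int) then
    match PySem.List.pop? st.2 k with
    | some pr => (st.1.set pr.1.toNat (ic.1 + 1), pr.2)
    | none => st          -- unreachable: k is a valid index
  else st

def decode_I_alt (inv : List Int) : List Int :=
  ((PySem.List.enumerate inv 0).foldl altStep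
    (List.replicate inv.length 0, PySem.List.pyRange 0 (inv.length : Int) 1)).1

-- ===== PRECONDITION & SPEC =====
def Spec_decode_I (inv : List Int) (out : List Int) : Prop := out = decode_I_alt inv
instance (inv : List Int) (out : List Int) : Decidable (Spec_decode_I inv out) := by unfold Spec_decode_I; infer_instance

-- ===== CLAIM (what is proved, stated in full; the proofs are below) =====
def Claim_equal_decode_I : Prop := ∀ (inv : List Int), Dom_decode_I inv → Spec_decode_I inv (decode_I inv)

-- ===== LEMMAS AND PROOFS =====

-- the sorted list of still-free (zero) positions of perm
def freeList (perm : List Int) : List Nat :=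
  (List.range perm.length).filter (fun t => perm.getD t 0 == 0)

lemma mem_freeList {perm : List Int} {x : Nat} (h : x ∈ freeList perm) :
    x < perm.length ∧ perm.getD x 0 = 0 := by
  unfold freeList at h
  simp only [List.mem_filter, List.mem_range, beq_iff_eq] at h
  exact h

lemma nodup_freeList (perm : List Int) : (freeList perm).Nodup :=
  (List.nodup_range).filter _

-- A's inner loop finds the count.toNat-th free slot at or after j (or returns N)
lemma decodeInner_spec (perm : List Int) :
    ∀ (fuel j : Nat) (count : Int), j < perm.length → fuel = perm.length - j →
    decodeInner perm count j fuel =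
      ((List.range' j (perm.length - j)).filter
        (fun t => perm.getD t 0 == 0)).getD count.toNat perm.length := by
  intro fuel
  induction fuel with
  | zero => intro j count hj hf; omega
  | succ fuel ih =>
    intro j count hj hf
    have hrange : perm.length - j = fuel + 1 := by omega
    rw [hrange, List.range'_succ]
    simp only [decodeInner]
    by_cases hc0 : perm.getD j 0 = 0
    · rw [List.filter_cons_of_pos (by simpa using hc0)]
      by_cases hcnt : count > 0
      · rw [if_pos (Or.inl hcnt)]
        by_cases hjN : j + 1 = perm.length
        · rw [if_pos hjN]
          have hfuel0 : fuel = 0 := by omega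
          subst hfuel0
          rw [List.range'_zero, List.filter_nil,
              List.getD_eq_default _ _ (by simp; omega)]
          omega
        · rw [if_neg hjN, if_pos hc0,
              ih (j+1) (count-1) (by omega) (by omega)]
          have h1 : perm.length - (j+1) = fuel := by omega
          rw [h1]
          have h2 : count.toNat = (count - 1).toNat + 1 := by omega
          rw [h2, List.getD_cons_succ]
      · rw [if_neg (by push Not; exact ⟨by omega, hc0⟩)]
        have h0 : count.toNat = 0 := by omega
        rw [h0, List.getD_cons_zero]
    · rw [List.filter_cons_of_neg (by simpa using hc0),
          if_pos (Or.inr hc0)]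
      by_cases hjN : j + 1 = perm.length
      · rw [if_pos hjN]
        have hfuel0 : fuel = 0 := by omega
        subst hfuel0
        rw [List.range'_zero, List.filter_nil, List.getD_nil]
        omega
      · rw [if_neg hjN, if_neg hc0,
            ih (j+1) count (by omega) (by omega)]
        have h1 : perm.length - (j+1) = fuel := by omega
        rw [h1]

lemma decodeInner_freeList (perm : List Int) (count : Int) (h : 0 < perm.length) :
    decodeInner perm count 0 perm.length =
      (freeList perm).getD count.toNat perm.length := by
  have := decodeInner_spec perm perm.length 0 count h (by omega)
  simpa [freeList, List.range_eq_range'] using this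

lemma filter_ne_eq_eraseIdx {l : List Nat} (h : l.Nodup) :
    ∀ (k : Nat), (hk : k < l.length) →
    l.filter (fun x => x != l[k]) = l.eraseIdx k := by
  induction l with
  | nil => intro k hk; simp at hk
  | cons a t ih =>
    rw [List.nodup_cons] at h
    intro k hk
    cases k with
    | zero =>
      simp only [List.getElem_cons_zero, List.eraseIdx_cons_zero]
      rw [List.filter_cons_of_neg (by simp)]
      rw [List.filter_eq_self.mpr]
      intro x hx
      simp only [bne_iff_ne, ne_eq]
      intro hxa
      exact h.1 (hxa ▸ hx)
    | succ k =>
      have hk' : k < t.length := by simpa using hk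
      simp only [List.getElem_cons_succ, List.eraseIdx_cons_succ]
      rw [List.filter_cons_of_pos (by
        simp only [bne_iff_ne, ne_eq]
        intro ha
        exact h.1 (ha ▸ t.getElem_mem hk'))]
      rw [ih h.2 k hk']

lemma freeList_set' (perm : List Int) (p : Nat) (v : Int) (hv : v ≠ 0) :
    freeList (perm.set p v) = (freeList perm).filter (fun x => x != p) := by
  unfold freeList
  rw [List.length_set, List.filter_filter]
  apply List.filter_congr
  intro t ht
  rw [List.mem_range] at ht
  by_cases htp : t = p
  · subst htp
    rw [List.getD_eq_getElem _ _ (by simpa [List.length_set] using ht),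
        List.getElem_set_self (by simpa [List.length_set] using ht)]
    simp [hv]
  · have heq : (perm.set p v).getD t 0 = perm.getD t 0 := by
      rw [List.getD_eq_getElem _ _ (by simpa [List.length_set] using ht),
          List.getD_eq_getElem _ _ ht, List.getElem_set_ne (by omega)]
    rw [heq]
    simp [htp]

lemma freeList_set (perm : List Int) (k : Nat) (v : Int)
    (hk : k < (freeList perm).length) (hv : v ≠ 0) :
    freeList (perm.set ((freeList perm)[k]) v) = (freeList perm).eraseIdx k := by
  rw [freeList_set' perm _ v hv,
      filter_ne_eq_eraseIdx (nodup_freeList perm) k hk]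

-- one aligned step preserves the free-list invariant and produces equal states
lemma step_pair (inv perm : List Int) (i : Nat) (hlen : perm.length = inv.length) :
    (decodeStep inv perm (i : Int),
      (freeList (decodeStep inv perm i)).map (fun (n : Nat) => (n : Int)))
    = altStep (perm, (freeList perm).map (fun (n : Nat) => (n : Int)))
        ((i : Int), PySem.List.pyGetD inv (i : Int) 0) := by
  simp only [decodeStep, altStep]
  set c := PySem.List.pyGetD inv (i : Int) 0 with hc
  have hkI : (if c > 0 then c else 0) = (c.toNat : Int) := by
    split_ifs <;> omega
  rcases Nat.eq_zero_or_pos inv.length with hN | hN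
  · have hperm : perm = [] := List.eq_nil_of_length_eq_zero (by omega)
    subst hperm
    simp [decodeInner, hN, freeList, hkI]
  · rw [show inv.length = perm.length from hlen.symm] at hN ⊢
    rw [decodeInner_freeList perm c hN]
    rw [hkI]
    by_cases hk : c.toNat < (freeList perm).length
    · rw [List.getD_eq_getElem _ _ hk]
      have hjN : (freeList perm)[c.toNat] < perm.length :=
        (mem_freeList ((freeList perm).getElem_mem hk)).1
      rw [if_pos hjN,
          if_pos (by simpa using (Int.ofNat_lt.mpr hk)),
          PySem.List.pop?_natCast _ _ (by simpa using hk)]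
      have hfv : ((freeList perm).map (fun (n : Nat) => (n : Int)))[c.toNat]'(by simpa using hk)
          = ((freeList perm)[c.toNat] : Int) := List.getElem_map _
      rw [freeList_set perm c.toNat (↑i + 1) hk (by omega), List.eraseIdx_map]
      simp [hfv]
    · rw [List.getD_eq_default _ _ (by omega)]
      rw [if_neg (by omega),
          if_neg (by simp only [List.length_map]; omega)]

lemma step_len (inv perm : List Int) (i : Nat) (hlen : perm.length = inv.length) :
    (decodeStep inv perm (i : Int)).length = inv.length := by
  unfold decodeStep
  dsimp only
  split <;> simp [hlen]

lemma fold_eq (inv : List Int) :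
    ∀ (l : List Nat) (perm : List Int), perm.length = inv.length →
    l.foldl (fun p (i : Nat) => decodeStep inv p (i : Int)) perm
    = (l.foldl (fun st (i : Nat) => altStep st ((i : Int), PySem.List.pyGetD inv (i : Int) 0))
        (perm, (freeList perm).map (fun (n : Nat) => (n : Int)))).1 := by
  intro l
  induction l with
  | nil => intro perm h; simp
  | cons i t ih =>
    intro perm h
    simp only [List.foldl_cons]
    rw [← step_pair inv perm i h]
    exact ih _ (step_len inv perm i h)

lemma freeList_replicate (n : Nat) :
    freeList (List.replicate n (0 : Int)) = List.range n := by
  unfold freeList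
  rw [List.length_replicate, List.filter_eq_self]
  intro a ha
  rw [List.mem_range] at ha
  simp

-- ===== VERDICT (by name: the statement is the Claim_ definition above) =====
theorem decode_I_spec : Claim_equal_decode_I := by
  unfold Claim_equal_decode_I Spec_decode_I
  intro inv _
  unfold decode_I decode_I_alt
  have hR : PySem.List.pyRange 0 (inv.length : Int) 1
      = (List.range inv.length).map (fun (k : Nat) => (k : Int)) := by
    rw [PySem.List.pyRange_one]; simp
  rw [PySem.List.enumerate_eq_map_pyRange (d := 0)]
  simp only [PySem.List.len_eq]
  rw [hR, List.foldl_map, List.foldl_map, List.foldl_map]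
  rw [show (List.range inv.length).map (fun (k : Nat) => (k : Int))
        = (freeList (List.replicate inv.length (0 : Int))).map (fun (n : Nat) => (n : Int)) from by
      rw [freeList_replicate]]
  exact fold_eq inv (List.range inv.length) _ List.length_replicate
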